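-- pv_equiv track=rewrite | github.com/dushshantha/Algorithms | StringsAndArrays.py | count3SumLessThan9
-- ===== SOURCE A (Python) =====
-- def count3SumLessThan9(nums):
--     count = 0
--     if len(nums) < 3:
--         return 0
--
--     s = nums[0] + nums[1] + nums[2]
--     if s < 9:
--         count += 1
--
--     i = 3
--
--     while i < len(nums):
--         s = s - nums[i - 3] + nums[i]
--         if s < 9:
--             count += 1
--         i += 1
--
--     return count
-- ===== SOURCE B (Python) =====
-- def count3SumLessThan9(nums):
--     return sum(1 for a, b, c in zip(nums, nums[1:], nums[2:]) if a + b + c < 9)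
-- ===== Notes on version B (the rewrite author's own statement) =====
-- stated objective: simpler
-- what changed: Replaced the stateful sliding-window (running sum maintained incrementally across a while loop over indices) with a stateless one-liner that zips the list with its two shifted copies and counts windows whose freshly computed sum is < 9.
import Mathlib
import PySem

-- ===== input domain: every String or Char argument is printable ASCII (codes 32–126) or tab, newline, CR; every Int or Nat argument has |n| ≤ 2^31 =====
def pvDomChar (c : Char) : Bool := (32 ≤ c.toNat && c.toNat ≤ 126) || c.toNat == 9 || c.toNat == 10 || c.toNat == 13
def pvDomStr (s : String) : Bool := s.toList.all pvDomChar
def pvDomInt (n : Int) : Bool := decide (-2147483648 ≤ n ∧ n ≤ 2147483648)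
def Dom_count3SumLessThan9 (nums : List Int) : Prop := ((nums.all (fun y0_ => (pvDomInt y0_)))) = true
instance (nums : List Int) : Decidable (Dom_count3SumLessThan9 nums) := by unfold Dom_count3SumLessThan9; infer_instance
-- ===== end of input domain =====

-- B replaces A's incremental running-sum while loop with a stateless count over
-- zipped shifted copies of the list (each window sum computed fresh); objective: simpler.

-- ===== PORT A =====
-- A's while loop: i runs from 3 to len, s is updated incrementally; all index
-- accesses are in range when the loop runs, so getD is exact here.
def pvALoop (nums : List Int) (i : Nat) (s count : Int) : Int :=
  if _h : i < nums.length then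
    let s' := s - nums.getD (i - 3) 0 + nums.getD i 0
    pvALoop nums (i + 1) s' (if s' < 9 then count + 1 else count)
  else count
termination_by nums.length - i

def count3SumLessThan9 (nums : List Int) : Int :=
  if nums.length < 3 then 0
  else
    let s := nums.getD 0 0 + nums.getD 1 0 + nums.getD 2 0
    let count : Int := if s < 9 then 1 else 0
    pvALoop nums 3 s count

-- ===== PORT B =====
-- zip nums nums[1:] nums[2:] and count triples summing below 9
def pvCountW : List Int → Int
  | a :: b :: c :: rest => (if a + b + c < 9 then 1 else 0) + pvCountW (b :: c :: rest)
  | _ => 0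
termination_by l => l.length

def count3SumLessThan9_alt (nums : List Int) : Int := pvCountW nums

-- ===== PRECONDITION & SPEC =====
def Spec_count3SumLessThan9 (nums : List Int) (out : Int) : Prop := out = count3SumLessThan9_alt nums
instance (nums : List Int) (out : Int) : Decidable (Spec_count3SumLessThan9 nums out) := by unfold Spec_count3SumLessThan9; infer_instance

-- ===== CLAIM (what is proved, stated in full; the proofs are below) =====
def Claim_equal_count3SumLessThan9 : Prop := ∀ (nums : List Int), Dom_count3SumLessThan9 nums → Spec_count3SumLessThan9 nums (count3SumLessThan9 nums)

-- ===== LEMMAS AND PROOFS =====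

theorem pvALoop_eq (u : List Int) : ∀ (nums : List Int) (i : Nat) (a b c count : Int),
    3 ≤ i → nums.drop (i - 3) = a :: b :: c :: u →
    pvALoop nums i (a + b + c) count = count + pvCountW (b :: c :: u) := by
  induction u with
  | nil =>
    intro nums i a b c count h3 hdrop
    have hlen : nums.length = i := by
      have := congrArg List.length hdrop
      simp [List.length_drop] at this
      omega
    rw [pvALoop]
    simp [hlen, pvCountW]
  | cons d u' ih =>
    intro nums i a b c count h3 hdrop
    have hlen : nums.length = i + 1 + u'.length := by
      have := congrArg List.length hdrop
      simp [List.length_drop] at this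
      omega
    have hi : i < nums.length := by omega
    -- nums[i-3] = a, nums[i] = d
    have hga : nums.getD (i - 3) 0 = a := by
      have h0 : nums[i - 3]? = some a := by
        have : (nums.drop (i - 3))[0]? = some a := by rw [hdrop]; rfl
        rwa [List.getElem?_drop, Nat.add_zero] at this
      simp [List.getD, h0]
    have hgd : nums.getD i 0 = d := by
      have h0 : nums[i]? = some d := by
        have : (nums.drop (i - 3))[3]? = some d := by rw [hdrop]; rfl
        rw [List.getElem?_drop] at this
        have he : i - 3 + 3 = i := by omega
        rwa [he] at this
      simp [List.getD, h0]
    have hdrop' : nums.drop (i + 1 - 3) = b :: c :: d :: u' := by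
      have he : i + 1 - 3 = (i - 3) + 1 := by omega
      rw [he, ← List.drop_drop]
      · rw [hdrop]; rfl
    rw [pvALoop]
    simp only [hi, dif_pos, hga, hgd]
    have hs' : a + b + c - a + d = b + c + d := by ring
    rw [hs']
    rw [ih nums (i + 1) b c d _ (by omega) hdrop']
    rw [pvCountW]
    split_ifs <;> ring

-- ===== VERDICT (by name: the statement is the Claim_ definition above) =====
theorem count3SumLessThan9_spec : Claim_equal_count3SumLessThan9 := by
  intro nums _
  unfold Spec_count3SumLessThan9 count3SumLessThan9 count3SumLessThan9_alt
  match nums with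
  | [] => simp [pvCountW]
  | [a] => simp [pvCountW]
  | [a, b] => simp [pvCountW]
  | a :: b :: c :: u =>
    have hlen : ¬ (a :: b :: c :: u).length < 3 := by simp
    simp only [hlen, if_false]
    have hdrop : (a :: b :: c :: u).drop (3 - 3) = a :: b :: c :: u := rfl
    have h := pvALoop_eq u (a :: b :: c :: u) 3 a b c
      (if a + b + c < 9 then (1:Int) else 0) (by omega) hdrop
    have hg0 : (a :: b :: c :: u).getD 0 0 = a := rfl
    have hg1 : (a :: b :: c :: u).getD 1 0 = b := rfl
    have hg2 : (a :: b :: c :: u).getD 2 0 = c := rfl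
    simp only [hg0, hg1, hg2]
    rw [h, pvCountW]
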